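-- pv_equiv track=rewrite | github.com/olga3n/adventofcode | 2023/day_19_aplenty_2.py | upd_intervals
-- ===== SOURCE A (Python) =====
-- from typing import Iterable, Callable, Tuple, Dict, List
--
-- def upd_intervals(
--     intervals: Dict[str, Tuple[int, int]], label: str, cmp: str, value: str
-- ) -> Tuple[Dict[str, Tuple[int, int]], Dict[str, Tuple[int, int]]]:
--     a_intervals = {}
--     r_intervals = {}
--
--     for symbol, (left, right) in intervals.items():
--         if symbol != label or (left, right) == (-1, -1):
--             a_intervals[symbol] = intervals[symbol]
--             r_intervals[symbol] = intervals[symbol]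
--             continue
--
--         accepted = (-1, -1)
--         rejected = (-1, -1)
--
--         if cmp == '<' and left < value <= right:
--             accepted = left, value - 1
--             rejected = value, right
--         elif cmp == '<' and value <= left:
--             rejected = left, right
--         elif cmp == '>' and left <= value < right:
--             accepted = value + 1, right
--             rejected = left, value
--         elif cmp == '>' and value >= right:
--             rejected = left, right
--         else:
--             accepted = left, right
--
--         a_intervals[symbol] = accepted
--         r_intervals[symbol] = rejected
--
--     return a_intervals, r_intervals
-- ===== SOURCE B (Python) =====
-- def upd_intervals(intervals, label, cmp, value):
--     # Region-projection decomposition: the comparison is translated once into a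
--     # pair of half-line regions (accepted region, rejected region), where a
--     # region is None (empty), or (lo, hi) bounds with None meaning unbounded.
--     # Each output dict is then an independent projection of the interval map
--     # onto its region; the per-item positional case analysis disappears.
--     if cmp == '<':
--         acc_region, rej_region = (None, value - 1), (value, None)
--     elif cmp == '>':
--         acc_region, rej_region = (value + 1, None), (None, value)
--     else:
--         acc_region, rej_region = (None, None), None
--
--     def project(region):
--         out = {}
--         for symbol, (left, right) in intervals.items():
--             if symbol != label or (left, right) == (-1, -1):
--                 out[symbol] = (left, right)
--             elif region is None:
--                 out[symbol] = (-1, -1)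
--             else:
--                 lo = left if region[0] is None else max(left, region[0])
--                 hi = right if region[1] is None else min(right, region[1])
--                 out[symbol] = (lo, hi) if lo <= hi else (-1, -1)
--         return out
--
--     return project(acc_region), project(rej_region)
-- ===== Notes on version B (the rewrite author's own statement) =====
-- stated objective: alternative
-- what changed: A's single loop with a five-way positional case split filling both dicts is replaced by a region-projection decomposition: the comparison is translated once into an accepted and a rejected half-line region, and each output dict is produced by an independent pass of one generic region-intersection helper.
-- intended difference: On inputs where some intervals entry maps the label to a non-sentinel inverted interval (left > right), A propagates the inverted pair into its output while B returns the (-1,-1) sentinel, the program's own representation of an empty interval and the intended value. — e.g. on upd_intervals([("a", 2, 1)], "a", "<", 2): A returns ([("a", -1, -1)], [("a", 2, 1)]), B returns ([("a", -1, -1)], [("a", -1, -1)])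
import Mathlib
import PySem

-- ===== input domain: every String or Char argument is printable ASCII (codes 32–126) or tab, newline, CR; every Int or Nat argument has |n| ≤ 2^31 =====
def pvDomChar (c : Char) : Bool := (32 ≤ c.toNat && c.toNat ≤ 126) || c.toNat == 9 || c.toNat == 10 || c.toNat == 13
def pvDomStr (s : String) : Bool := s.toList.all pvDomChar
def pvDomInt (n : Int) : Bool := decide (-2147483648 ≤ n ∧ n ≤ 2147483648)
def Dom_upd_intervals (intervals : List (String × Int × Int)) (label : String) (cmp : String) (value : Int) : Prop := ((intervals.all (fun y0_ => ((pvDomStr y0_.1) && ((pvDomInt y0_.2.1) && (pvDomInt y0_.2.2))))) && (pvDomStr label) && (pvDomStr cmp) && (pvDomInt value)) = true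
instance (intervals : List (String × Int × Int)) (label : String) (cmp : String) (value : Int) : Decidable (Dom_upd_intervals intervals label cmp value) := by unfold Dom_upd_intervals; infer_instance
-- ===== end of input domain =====

-- B replaces A's per-item five-way positional case analysis by two staged
-- region projections: the comparison is translated once into an accepted and a
-- rejected half-line region, and each output is an independent projection of
-- the interval map onto its region (objective: alternative decomposition).


-- ===== PORT A =====
def upd_intervals (intervals : List (String × Int × Int)) (label : String) (cmp : String) (value : Int) : (List (String × Int × Int)) × (List (String × Int × Int)) :=
  -- the input dict; `intervals[symbol]` is a first-match lookup on its items
  let src : PySem.Dict String (Int × Int) := PySem.Dict.mk intervals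
  let st :=
    intervals.foldl
      (fun (st : PySem.Dict String (Int × Int) × PySem.Dict String (Int × Int)) it =>
        let symbol := it.1
        let left := it.2.1
        let right := it.2.2
        if symbol ≠ label ∨ ((left, right) : Int × Int) = (-1, -1) then
          -- a_intervals[symbol] = intervals[symbol]: the key comes from the items of
          -- `src` itself, so `get?` is always `some`; the `getD` default never fires
          (st.1.insert symbol ((src.get? symbol).getD (left, right)),
           st.2.insert symbol ((src.get? symbol).getD (left, right)))
        else
          let accepted : Int × Int := (-1, -1)
          let rejected : Int × Int := (-1, -1)
          let ar :=
            if cmp = "<" ∧ left < value ∧ value ≤ right then ((left, value - 1), (value, right))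
            else if cmp = "<" ∧ value ≤ left then (accepted, (left, right))
            else if cmp = ">" ∧ left ≤ value ∧ value < right then ((value + 1, right), (left, value))
            else if cmp = ">" ∧ value ≥ right then (accepted, (left, right))
            else ((left, right), rejected)
          (st.1.insert symbol ar.1, st.2.insert symbol ar.2))
      (PySem.Dict.empty, PySem.Dict.empty)
  (st.1.items, st.2.items)

-- ===== PORT B =====
-- a region is `none` (empty) or bounds (lo?, hi?) with `none` meaning unbounded
def pvProject (intervals : List (String × Int × Int)) (label : String)
    (region : Option (Option Int × Option Int)) : List (String × Int × Int) :=
  (intervals.foldl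
    (fun (out : PySem.Dict String (Int × Int)) it =>
      let symbol := it.1
      let left := it.2.1
      let right := it.2.2
      if symbol ≠ label ∨ ((left, right) : Int × Int) = (-1, -1) then
        out.insert symbol (left, right)
      else
        match region with
        | none => out.insert symbol (-1, -1)
        | some (rlo, rhi) =>
          let lo := match rlo with | none => left | some a => max left a
          let hi := match rhi with | none => right | some b => min right b
          out.insert symbol (if lo ≤ hi then (lo, hi) else (-1, -1)))
    PySem.Dict.empty).items

def upd_intervals_alt (intervals : List (String × Int × Int)) (label : String) (cmp : String) (value : Int) : (List (String × Int × Int)) × (List (String × Int × Int)) :=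
  let regions : Option (Option Int × Option Int) × Option (Option Int × Option Int) :=
    if cmp = "<" then (some (none, some (value - 1)), some (some value, none))
    else if cmp = ">" then (some (some (value + 1), none), some (none, some value))
    else (some (none, none), none)
  (pvProject intervals label regions.1, pvProject intervals label regions.2)

-- ===== PRECONDITION & SPEC =====
-- Pre_ excludes association lists with duplicate symbols, on which the assoc-list
-- encoding of the input dict is ambiguous (a Python dict never has them).
def Pre_upd_intervals (intervals : List (String × Int × Int)) (label : String) (cmp : String) (value : Int) : Prop :=
  (intervals.map Prod.fst).Nodup
instance (intervals : List (String × Int × Int)) (label : String) (cmp : String) (value : Int) : Decidable (Pre_upd_intervals intervals label cmp value) := by unfold Pre_upd_intervals; infer_instance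

def pvWitness_upd_intervals : (List (String × Int × Int)) × String × String × Int :=
  ([("x", 1, 10), ("m", -1, -1), ("s", 3, 7)], "x", "<", 5)

-- When some entry of intervals maps the label to a non-sentinel inverted interval
-- (left > right), A propagates the inverted pair into its output while B returns the
-- (-1, -1) empty sentinel there — the program's own representation of an empty
-- interval, hence the intended value.
def D_upd_intervals (intervals : List (String × Int × Int)) (label : String) (cmp : String) (value : Int) : Prop :=
  ∃ e ∈ intervals, e.1 = label ∧ ¬(e.2.1 = -1 ∧ e.2.2 = -1) ∧ e.2.2 < e.2.1
instance (intervals : List (String × Int × Int)) (label : String) (cmp : String) (value : Int) : Decidable (D_upd_intervals intervals label cmp value) := by unfold D_upd_intervals; infer_instance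

def pvDiffWitness_upd_intervals : (List (String × Int × Int)) × String × String × Int :=
  ([("a", 2, 1)], "a", "<", 2)
def pvDiffWitnessOut_upd_intervals : ((List (String × Int × Int)) × (List (String × Int × Int))) × ((List (String × Int × Int)) × (List (String × Int × Int))) :=
  (([("a", -1, -1)], [("a", 2, 1)]), ([("a", -1, -1)], [("a", -1, -1)]))

def Spec_upd_intervals (intervals : List (String × Int × Int)) (label : String) (cmp : String) (value : Int) (out : (List (String × Int × Int)) × (List (String × Int × Int))) : Prop := ¬ D_upd_intervals intervals label cmp value → out = upd_intervals_alt intervals label cmp value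
instance (intervals : List (String × Int × Int)) (label : String) (cmp : String) (value : Int) (out : (List (String × Int × Int)) × (List (String × Int × Int))) : Decidable (Spec_upd_intervals intervals label cmp value out) := by unfold Spec_upd_intervals; infer_instance

-- ===== CLAIM (what is proved, stated in full; the proofs are below) =====
def Claim_unchanged_upd_intervals : Prop := ∀ (intervals : List (String × Int × Int)) (label : String) (cmp : String) (value : Int), Dom_upd_intervals intervals label cmp value → Pre_upd_intervals intervals label cmp value → Spec_upd_intervals intervals label cmp value (upd_intervals intervals label cmp value)
def Claim_changed_upd_intervals : Prop := Dom_upd_intervals (pvDiffWitness_upd_intervals.1) (pvDiffWitness_upd_intervals.2.1) (pvDiffWitness_upd_intervals.2.2.1) (pvDiffWitness_upd_intervals.2.2.2) ∧ Pre_upd_intervals (pvDiffWitness_upd_intervals.1) (pvDiffWitness_upd_intervals.2.1) (pvDiffWitness_upd_intervals.2.2.1) (pvDiffWitness_upd_intervals.2.2.2) ∧ D_upd_intervals (pvDiffWitness_upd_intervals.1) (pvDiffWitness_upd_intervals.2.1) (pvDiffWitness_upd_intervals.2.2.1) (pvDiffWitness_upd_intervals.2.2.2) ∧ upd_intervals (pvDiffWitness_upd_intervals.1)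 (pvDiffWitness_upd_intervals.2.1) (pvDiffWitness_upd_intervals.2.2.1) (pvDiffWitness_upd_intervals.2.2.2) = pvDiffWitnessOut_upd_intervals.1 ∧ upd_intervals_alt (pvDiffWitness_upd_intervals.1) (pvDiffWitness_upd_intervals.2.1) (pvDiffWitness_upd_intervals.2.2.1) (pvDiffWitness_upd_intervals.2.2.2) = pvDiffWitnessOut_upd_intervals.2 ∧ pvDiffWitnessOut_upd_intervals.1 ≠ pvDiffWitnessOut_upd_intervals.2
def Claim_exact_upd_intervals : Prop := ∀ (intervals : List (String × Int × Int)) (label : String) (cmp : String) (value : Int), Dom_upd_intervals intervals label cmp value → Pre_upd_intervals intervals label cmp value → D_upd_intervals intervals label cmp value → upd_intervals intervals label cmp value ≠ upd_intervals_alt intervals label cmp value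

-- ===== LEMMAS AND PROOFS =====

-- A's five-way branch chain, on bare integer pairs, equals B's two region
-- intersections, for a non-inverted interval
theorem step_eq (cmp : String) (l r v : Int) (hlr : l ≤ r) :
    (if cmp = "<" ∧ l < v ∧ v ≤ r then ((l, v - 1), (v, r))
     else if cmp = "<" ∧ v ≤ l then (((-1, -1) : Int × Int), (l, r))
     else if cmp = ">" ∧ l ≤ v ∧ v < r then ((v + 1, r), (l, v))
     else if cmp = ">" ∧ v ≥ r then (((-1, -1) : Int × Int), (l, r))
     else ((l, r), ((-1, -1) : Int × Int)))
    =
    (if cmp = "<" then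
       ((if l ≤ min r (v - 1) then (l, min r (v - 1)) else ((-1, -1) : Int × Int)),
        (if max l v ≤ r then (max l v, r) else ((-1, -1) : Int × Int)))
     else if cmp = ">" then
       ((if max l (v + 1) ≤ r then (max l (v + 1), r) else ((-1, -1) : Int × Int)),
        (if l ≤ min r v then (l, min r v) else ((-1, -1) : Int × Int)))
     else ((if l ≤ r then (l, r) else ((-1, -1) : Int × Int)), ((-1, -1) : Int × Int))) := by
  simp only [min_def, max_def]
  split_ifs <;> simp_all [Prod.mk.injEq] <;> omega

-- a pair-fold whose step acts componentwise on the members of l splits into two folds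
theorem foldl_pair_split {γ α β : Type} (f : α × β → γ → α × β) (g1 : α → γ → α)
    (g2 : β → γ → β) (l : List γ) (d1 : α) (d2 : β)
    (hstep : ∀ a b x, x ∈ l → f (a, b) x = (g1 a x, g2 b x)) :
    l.foldl f (d1, d2) = (l.foldl g1 d1, l.foldl g2 d2) := by
  induction l generalizing d1 d2 with
  | nil => rfl
  | cons x xs ih =>
    simp only [List.foldl_cons, hstep d1 d2 x (List.mem_cons_self ..)]
    exact ih _ _ (fun a b y hy => hstep a b y (List.mem_cons_of_mem _ hy))

-- ——— helpers for the tightness proof: both folds written as maps over fresh keys ———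

def pvChainA (cmp : String) (v l r : Int) : (Int × Int) × (Int × Int) :=
  if cmp = "<" ∧ l < v ∧ v ≤ r then ((l, v - 1), (v, r))
  else if cmp = "<" ∧ v ≤ l then ((-1, -1), (l, r))
  else if cmp = ">" ∧ l ≤ v ∧ v < r then ((v + 1, r), (l, v))
  else if cmp = ">" ∧ v ≥ r then ((-1, -1), (l, r))
  else ((l, r), (-1, -1))

def pvStepA (src : PySem.Dict String (Int × Int)) (label cmp : String) (v : Int)
    (it : String × Int × Int) : (Int × Int) × (Int × Int) :=
  if it.1 ≠ label ∨ ((it.2.1, it.2.2) : Int × Int) = (-1, -1) then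
    ((src.get? it.1).getD (it.2.1, it.2.2), (src.get? it.1).getD (it.2.1, it.2.2))
  else pvChainA cmp v it.2.1 it.2.2

def pvStepB (label : String) (region : Option (Option Int × Option Int))
    (it : String × Int × Int) : Int × Int :=
  if it.1 ≠ label ∨ ((it.2.1, it.2.2) : Int × Int) = (-1, -1) then (it.2.1, it.2.2)
  else
    match region with
    | none => (-1, -1)
    | some (rlo, rhi) =>
      let lo := match rlo with | none => it.2.1 | some a => max it.2.1 a
      let hi := match rhi with | none => it.2.2 | some b => min it.2.2 b
      if lo ≤ hi then (lo, hi) else (-1, -1)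

theorem upd_intervals_as_map (intervals : List (String × Int × Int)) (label cmp : String)
    (value : Int) (hpre : (intervals.map Prod.fst).Nodup) :
    upd_intervals intervals label cmp value =
      (intervals.map (fun a => (a.1, (pvStepA (PySem.Dict.mk intervals) label cmp value a).1)),
       intervals.map (fun a => (a.1, (pvStepA (PySem.Dict.mk intervals) label cmp value a).2))) := by
  unfold upd_intervals
  dsimp only
  rw [foldl_pair_split _
    (fun (d : PySem.Dict String (Int × Int)) it =>
      d.insert it.1 (pvStepA (PySem.Dict.mk intervals) label cmp value it).1)
    (fun (d : PySem.Dict String (Int × Int)) it =>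
      d.insert it.1 (pvStepA (PySem.Dict.mk intervals) label cmp value it).2)
    intervals PySem.Dict.empty PySem.Dict.empty ?_]
  · dsimp only
    rw [PySem.Dict.items_foldl_insert_fresh intervals (fun a => a.1)
        (fun a => (pvStepA (PySem.Dict.mk intervals) label cmp value a).1) PySem.Dict.empty
        (fun a _ => by simp [PySem.Dict.contains_empty]) (by simpa using hpre),
      PySem.Dict.items_foldl_insert_fresh intervals (fun a => a.1)
        (fun a => (pvStepA (PySem.Dict.mk intervals) label cmp value a).2) PySem.Dict.empty
        (fun a _ => by simp [PySem.Dict.contains_empty]) (by simpa using hpre)]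
    rfl
  · intro a b x _
    obtain ⟨s, lv, rv⟩ := x
    dsimp only
    by_cases hc : s ≠ label ∨ ((lv, rv) : Int × Int) = (-1, -1)
    · rw [if_pos hc]
      simp only [pvStepA, if_pos hc]
    · rw [if_neg hc]
      simp only [pvStepA, if_neg hc, pvChainA]

theorem pvProject_as_map (intervals : List (String × Int × Int)) (label : String)
    (region : Option (Option Int × Option Int))
    (hpre : (intervals.map Prod.fst).Nodup) :
    pvProject intervals label region =
      intervals.map (fun a => (a.1, pvStepB label region a)) := by
  unfold pvProject
  dsimp only
  rw [PySem.List.foldl_congr_mem intervals _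
    (fun (d : PySem.Dict String (Int × Int)) it => d.insert it.1 (pvStepB label region it))
    PySem.Dict.empty ?_]
  · rw [PySem.Dict.items_foldl_insert_fresh intervals (fun a => a.1)
        (fun a => pvStepB label region a) PySem.Dict.empty
        (fun a _ => by simp [PySem.Dict.contains_empty]) (by simpa using hpre)]
    rfl
  · intro d x _
    obtain ⟨s, lv, rv⟩ := x
    dsimp only
    by_cases hc : s ≠ label ∨ ((lv, rv) : Int × Int) = (-1, -1)
    · rw [if_pos hc]
      simp only [pvStepB, if_pos hc]
    · rw [if_neg hc]
      simp only [pvStepB, if_neg hc]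
      cases region with
      | none => rfl
      | some p => rfl

theorem upd_intervals_spec : Claim_unchanged_upd_intervals := by
  intro intervals label cmp value _hdom hpre hD
  unfold Pre_upd_intervals at hpre
  unfold D_upd_intervals at hD
  have hwf : ∀ e ∈ intervals, e.1 = label → ¬(e.2.1 = -1 ∧ e.2.2 = -1) → e.2.1 ≤ e.2.2 := by
    intro e he h1 h2
    by_contra hlt
    exact hD ⟨e, he, h1, h2, by omega⟩
  unfold upd_intervals upd_intervals_alt pvProject
  dsimp only
  refine congrArg
    (fun st : PySem.Dict String (Int × Int) × PySem.Dict String (Int × Int) =>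
      (st.1.items, st.2.items))
    (foldl_pair_split _ _ _ _ _ _ ?_)
  intro a b x hx
  obtain ⟨s, lv, rv⟩ := x
  dsimp only
  by_cases hc : s ≠ label ∨ ((lv, rv) : Int × Int) = (-1, -1)
  · rw [if_pos hc, if_pos hc, if_pos hc]
    have hget : (PySem.Dict.mk intervals).get? s = some (lv, rv) := by
      apply PySem.Dict.get?_of_mem_items
      · exact hx
      · simpa [PySem.Dict.keys] using hpre
    rw [hget]
    rfl
  · have hs : s = label := by by_contra h; exact hc (Or.inl h)
    have hsent : ¬(lv = -1 ∧ rv = -1) := by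
      intro hh; exact hc (Or.inr (by rw [hh.1, hh.2]))
    have hlr : lv ≤ rv := hwf (s, lv, rv) hx hs hsent
    rw [if_neg hc, if_neg hc, if_neg hc]
    rw [step_eq cmp lv rv value hlr]
    by_cases h1 : cmp = "<"
    · simp only [if_pos h1]
    · by_cases h2 : cmp = ">"
      · simp only [if_neg h1, if_pos h2]
      · simp only [if_neg h1, if_neg h2]

theorem upd_intervals_changed : Claim_changed_upd_intervals := by
  unfold Claim_changed_upd_intervals
  exact ⟨by decide, by decide, by decide, by decide, by decide, by decide⟩

theorem upd_intervals_tight : Claim_exact_upd_intervals := by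
  intro intervals label cmp value _hdom hpre hD heq
  unfold Pre_upd_intervals at hpre
  unfold D_upd_intervals at hD
  obtain ⟨e, he, hlab, hsent, hinv⟩ := hD
  rw [upd_intervals_as_map intervals label cmp value hpre] at heq
  unfold upd_intervals_alt at heq
  dsimp only at heq
  rw [pvProject_as_map intervals label _ hpre, pvProject_as_map intervals label _ hpre] at heq
  have h1 := congrArg Prod.fst heq
  have h2 := congrArg Prod.snd heq
  dsimp only at h1 h2
  rw [List.map_inj_left] at h1 h2
  have e1 := congrArg Prod.snd (h1 e he)
  have e2 := congrArg Prod.snd (h2 e he)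
  dsimp only at e1 e2
  obtain ⟨s, lv, rv⟩ := e
  dsimp only at hlab hsent hinv
  have hc : ¬(s ≠ label ∨ ((lv, rv) : Int × Int) = (-1, -1)) := by
    push_neg
    exact ⟨hlab, by intro hh; exact hsent ⟨congrArg Prod.fst hh, congrArg Prod.snd hh⟩⟩
  simp only [pvStepA, pvStepB, if_neg hc, pvChainA] at e1 e2
  by_cases hlt : cmp = "<"
  · simp only [if_pos hlt] at e1 e2
    split_ifs at e1 e2 <;> simp_all [Prod.mk.injEq] <;> omega
  · by_cases hgt : cmp = ">"
    · simp only [if_neg hlt, if_pos hgt] at e1 e2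
      split_ifs at e1 e2 <;> simp_all [Prod.mk.injEq] <;> omega
    · simp only [if_neg hlt, if_neg hgt] at e1 e2
      split_ifs at e1 e2 <;> simp_all [Prod.mk.injEq] <;> omega
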